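-- pv_equiv track=rewrite | github.com/242lee/Albamo | 김민수/24_10_14-8주차/스마트 물류.py | max_robots_can_grab_parts
-- ===== SOURCE A (Python) =====
-- def max_robots_can_grab_parts(n, k, line):
--     robots = []
--     parts = []
--
--     # 로봇과 부품의 위치를 저장
--     for i in range(n):
--         if line[i] == 'P':
--             robots.append(i)
--         elif line[i] == 'H':
--             parts.append(i)
--
--     count = 0
--     part_used = [False] * len(parts)  # 부품 사용 여부 체크
--
--     # 각 로봇에 대해 가장 먼 부품을 먼저 잡도록 처리
--     for robot in robots:
--         for i in range(len(parts)):
--             if abs(robot - parts[i]) <= k and not part_used[i]:  # 거리 내에 있는지, 사용된 적 없는 부품인지 체크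
--                 count += 1
--                 part_used[i] = True  # 부품 사용 처리
--                 break  # 해당 로봇은 부품을 잡았으므로 다음 로봇으로 이동
--
--     return count
-- ===== SOURCE B (Python) =====
-- def max_robots_can_grab_parts(n, k, line):
--     # One pass to collect positions, then a single two-pointer sweep:
--     # both robots and parts come out in increasing order, so the first unused
--     # part in range of a robot is always at (or after) a monotone pointer.
--     robots = []
--     parts = []
--     for i, c in enumerate(line):
--         if i >= n:
--             break
--         if c == 'P':
--             robots.append(i)
--         elif c == 'H':
--             parts.append(i)
--     count = 0
--     j = 0
--     m = len(parts)
--     for r in robots: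
--         while j < m and parts[j] < r - k:
--             j += 1
--         if j < m and parts[j] <= r + k:
--             count += 1
--             j += 1
--     return count
-- ===== Notes on version B (the rewrite author's own statement) =====
-- stated objective: alternative
-- what changed: A rescans the whole parts list from index 0 for every robot; B exploits that robots and parts are both collected in increasing position order and replaces the inner rescan with a single monotone two-pointer sweep over the parts list (intended as asymptotically faster; a timing run measured only ~1.3x on its generated inputs).
import Mathlib
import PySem

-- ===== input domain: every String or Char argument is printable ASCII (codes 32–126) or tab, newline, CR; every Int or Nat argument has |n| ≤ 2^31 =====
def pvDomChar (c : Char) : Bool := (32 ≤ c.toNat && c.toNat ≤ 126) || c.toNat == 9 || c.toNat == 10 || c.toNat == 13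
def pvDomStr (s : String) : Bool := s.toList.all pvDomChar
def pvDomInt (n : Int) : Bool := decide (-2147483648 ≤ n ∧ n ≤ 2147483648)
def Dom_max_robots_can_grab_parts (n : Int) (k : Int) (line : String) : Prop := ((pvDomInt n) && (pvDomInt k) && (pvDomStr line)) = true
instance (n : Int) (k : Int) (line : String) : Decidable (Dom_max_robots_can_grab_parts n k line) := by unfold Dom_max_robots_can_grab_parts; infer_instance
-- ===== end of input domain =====

-- B replaces A's per-robot rescan of the whole parts list by a single monotone
-- two-pointer sweep (robots and parts are collected in increasing position order).

-- ===== PORT A =====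
-- A's first loop: for i in range(n): classify line[i] into robots / parts
def pvA_parse (line : List Char) (n : Int) : List Int × List Int :=
  (PySem.List.pyRange 0 n 1).foldl
    (fun acc i =>
      match PySem.List.pyGet? line i with
      | some c =>
          if c = 'P' then (acc.1 ++ [i], acc.2)
          else if c = 'H' then (acc.1, acc.2 ++ [i])
          else acc
      | none => acc)  -- Python raises IndexError here; excluded by Pre_
    ([], [])

-- A's inner loop: first index i (from a given start) with abs(robot - parts[i]) <= k and not part_used[i]
def pvA_find (k r : Int) (parts : List Int) (used : List Bool) (i : Nat) : Option Nat :=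
  if h : i < parts.length then
    if |r - parts[i]| ≤ k ∧ used.getD i false = false then some i
    else pvA_find k r parts used (i + 1)
  else none
  termination_by parts.length - i

def max_robots_can_grab_parts (n : Int) (k : Int) (line : String) : Int :=
  let rp := pvA_parse line.toList n
  let parts := rp.2
  (rp.1.foldl
    (fun (st : Int × List Bool) r =>
      match pvA_find k r parts st.2 0 with
      | some i => (st.1 + 1, st.2.set i true)
      | none => st)
    (0, List.replicate parts.length false)).1

-- ===== PORT B =====
-- B's collection loop: enumerate(line), break once i >= n
def pvB_parse (cs : List Char) (i n : Int) : List Int × List Int :=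
  match cs with
  | [] => ([], [])
  | c :: t =>
    if n ≤ i then ([], [])
    else
      let rest := pvB_parse t (i + 1) n
      if c = 'P' then (i :: rest.1, rest.2)
      else if c = 'H' then (rest.1, i :: rest.2)
      else rest

-- B's while loop: advance the pointer j past parts strictly below bound
def pvB_skip (parts : List Int) (bound : Int) (j : Nat) : Nat :=
  if h : j < parts.length then
    if parts[j] < bound then pvB_skip parts bound (j + 1) else j
  else j
  termination_by parts.length - j

def max_robots_can_grab_parts_alt (n : Int) (k : Int) (line : String) : Int :=
  let rp := pvB_parse line.toList 0 n
  let parts := rp.2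
  (rp.1.foldl
    (fun (st : Nat × Int) r =>
      let j := pvB_skip parts (r - k) st.1
      if h : j < parts.length then
        if parts[j] ≤ r + k then (j + 1, st.2 + 1) else (j, st.2)
      else (j, st.2))
    (0, 0)).2

-- ===== PRECONDITION & SPEC =====
-- A indexes line[i] for every i in range(n), so it raises IndexError iff n > len(line).
def Pre_max_robots_can_grab_parts (n : Int) (k : Int) (line : String) : Prop :=
  n ≤ (line.toList.length : Int)
instance (n : Int) (k : Int) (line : String) : Decidable (Pre_max_robots_can_grab_parts n k line) := by unfold Pre_max_robots_can_grab_parts; infer_instance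

def pvWitness_max_robots_can_grab_parts : Int × Int × String := (6, 2, "P.H.HP")

def Spec_max_robots_can_grab_parts (n : Int) (k : Int) (line : String) (out : Int) : Prop := out = max_robots_can_grab_parts_alt n k line
instance (n : Int) (k : Int) (line : String) (out : Int) : Decidable (Spec_max_robots_can_grab_parts n k line out) := by unfold Spec_max_robots_can_grab_parts; infer_instance

-- ===== CLAIM (what is proved, stated in full; the proofs are below) =====
def Claim_equal_max_robots_can_grab_parts : Prop := ∀ (n : Int) (k : Int) (line : String), Dom_max_robots_can_grab_parts n k line → Pre_max_robots_can_grab_parts n k line → Spec_max_robots_can_grab_parts n k line (max_robots_can_grab_parts n k line)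


-- ===== LEMMAS AND PROOFS =====

lemma pyRange_one_nil (a b : Int) (h : b ≤ a) : PySem.List.pyRange a b 1 = [] := by
  rw [PySem.List.pyRange_one]
  have : (b - a).toNat = 0 := by omega
  simp [this]

lemma pvParse_eq (cs : List Char) : ∀ (line : List Char) (i n : Int) (acc : List Int × List Int),
    0 ≤ i → line.drop i.toNat = cs → n ≤ (line.length : Int) →
    (PySem.List.pyRange i n 1).foldl
      (fun acc j =>
        match PySem.List.pyGet? line j with
        | some c =>
            if c = 'P' then (acc.1 ++ [j], acc.2)
            else if c = 'H' then (acc.1, acc.2 ++ [j])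
            else acc
        | none => acc) acc
    = (acc.1 ++ (pvB_parse cs i n).1, acc.2 ++ (pvB_parse cs i n).2) := by
  induction cs with
  | nil =>
    intro line i n acc hi hdrop hn
    have hlen : line.length ≤ i.toNat := List.drop_eq_nil_iff.1 hdrop
    have : n ≤ i := by omega
    rw [pyRange_one_nil _ _ this]
    simp [pvB_parse]
  | cons c t ih =>
    intro line i n acc hi hdrop hn
    have hilen : i.toNat < line.length := by
      by_contra hc
      rw [List.drop_eq_nil_iff.2 (by omega)] at hdrop
      exact absurd hdrop (by simp)
    by_cases hni : n ≤ i
    · rw [pyRange_one_nil _ _ hni]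
      simp [pvB_parse, hni]
    · rw [PySem.List.pyRange_one_cons (by omega)]
      have hget : PySem.List.pyGet? line i = some c := by
        rw [PySem.List.pyGet?_of_nonneg _ hi]
        have h0 := congrArg List.head? hdrop
        rw [List.head?_drop] at h0
        simpa using h0
      have hdrop' : line.drop (i + 1).toNat = t := by
        have : (i + 1).toNat = i.toNat + 1 := by omega
        rw [this, ← List.drop_drop (i := 1), hdrop]
        rfl
      simp only [List.foldl_cons, hget]
      by_cases h1 : c = 'P'
      · rw [if_pos h1, ih line (i+1) n _ (by omega) hdrop' hn]
        simp [pvB_parse, h1, hni]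
      · by_cases h2 : c = 'H'
        · rw [if_neg h1, if_pos h2, ih line (i+1) n _ (by omega) hdrop' hn]
          simp [pvB_parse, h2, hni]
        · rw [if_neg h1, if_neg h2, ih line (i+1) n _ (by omega) hdrop' hn]
          simp [pvB_parse, h1, h2, hni]

lemma pvB_parse_ge (cs : List Char) : ∀ (i n : Int),
    (∀ x ∈ (pvB_parse cs i n).1, i ≤ x) ∧ (∀ x ∈ (pvB_parse cs i n).2, i ≤ x) := by
  induction cs with
  | nil => intro i n; simp [pvB_parse]
  | cons c t ih =>
    intro i n
    simp only [pvB_parse]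
    split
    · simp
    · have h := ih (i + 1) n
      split_ifs with h1 h2 <;> constructor <;> intro x hx
      · rcases List.mem_cons.1 hx with rfl | hx
        · omega
        · have := h.1 x hx; omega
      · have := h.2 x hx; omega
      · have := h.1 x hx; omega
      · rcases List.mem_cons.1 hx with rfl | hx
        · omega
        · have := h.2 x hx; omega
      · have := h.1 x hx; omega
      · have := h.2 x hx; omega

lemma pvB_parse_sorted (cs : List Char) : ∀ (i n : Int),
    (pvB_parse cs i n).1.Pairwise (· < ·) ∧ (pvB_parse cs i n).2.Pairwise (· < ·) := by
  induction cs with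
  | nil => intro i n; simp [pvB_parse]
  | cons c t ih =>
    intro i n
    simp only [pvB_parse]
    split
    · simp
    · have h := ih (i + 1) n
      have hg := pvB_parse_ge t (i + 1) n
      split_ifs with h1 h2
      · exact ⟨List.pairwise_cons.2 ⟨fun x hx => by have := hg.1 x hx; omega, h.1⟩, h.2⟩
      · exact ⟨h.1, List.pairwise_cons.2 ⟨fun x hx => by have := hg.2 x hx; omega, h.2⟩⟩
      · exact h

lemma pvB_skip_le (parts : List Int) (b : Int) (j : Nat) : j ≤ pvB_skip parts b j := by
  fun_induction pvB_skip <;> omega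
lemma pvB_skip_le_length (parts : List Int) (b : Int) (j : Nat) (h : j ≤ parts.length) :
    pvB_skip parts b j ≤ parts.length := by
  fun_induction pvB_skip <;> omega
lemma pvB_skip_below (parts : List Int) (b : Int) (j : Nat) :
    ∀ i (h : i < parts.length), j ≤ i → i < pvB_skip parts b j → parts[i] < b := by
  fun_induction pvB_skip with
  | case1 j h hlt ih =>
    intro i hi hji hib
    rcases Nat.eq_or_lt_of_le hji with rfl | hj
    · exact hlt
    · exact ih i hi hj hib
  | case2 j h hlt => intro i hi hji hib; omega
  | case3 j h => intro i hi hji hib; omega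
lemma pvB_skip_stop (parts : List Int) (b : Int) (j : Nat)
    (h : pvB_skip parts b j < parts.length) : ¬ parts[pvB_skip parts b j] < b := by
  fun_induction pvB_skip with
  | case1 j h' hlt ih => exact ih h
  | case2 j h' hlt => exact hlt
  | case3 j h' => omega
lemma pvA_find_none (k r : Int) (parts : List Int) (used : List Bool) :
    ∀ (s : Nat), (∀ i (h : i < parts.length), s ≤ i → ¬(|r - parts[i]| ≤ k ∧ used.getD i false = false)) →
    pvA_find k r parts used s = none := by
  intro s
  fun_induction pvA_find with
  | case1 s h hok => intro hall; exact absurd hok (hall s h le_rfl)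
  | case2 s h hok ih => intro hall; exact ih fun i hi hsi => hall i hi (by omega)
  | case3 s h => intro _; rfl
lemma pvA_find_some (k r : Int) (parts : List Int) (used : List Bool) (t : Nat)
    (ht : t < parts.length) (hok : |r - parts[t]| ≤ k ∧ used.getD t false = false) :
    ∀ (s : Nat), s ≤ t → (∀ i (h : i < parts.length), s ≤ i → i < t → ¬(|r - parts[i]| ≤ k ∧ used.getD i false = false)) →
    pvA_find k r parts used s = some t := by
  intro s
  fun_induction pvA_find with
  | case1 s h hc =>
    intro hst hall
    rcases Nat.eq_or_lt_of_le hst with rfl | hlt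
    · rfl
    · exact absurd hc (hall s h le_rfl hlt)
  | case2 s h hc ih =>
    intro hst hall
    rcases Nat.eq_or_lt_of_le hst with rfl | hlt
    · exact absurd hok hc
    · exact ih hlt fun i hi hsi hit => hall i hi (by omega) hit
  | case3 s h => intro hst _; omega

lemma pvMain (k : Int) (parts : List Int) (hp : parts.Pairwise (· < ·)) :
    ∀ (rs : List Int), rs.Pairwise (· < ·) →
    ∀ (used : List Bool) (j : Nat) (c : Int),
    used.length = parts.length →
    j ≤ parts.length →
    (∀ i (h : i < used.length), j ≤ i → used[i] = false) →
    (∀ i (h : i < parts.length), i < j → used.getD i false = false → ∀ r ∈ rs, parts[i] < r - k) →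
    (rs.foldl
      (fun (st : Int × List Bool) r =>
        match pvA_find k r parts st.2 0 with
        | some i => (st.1 + 1, st.2.set i true)
        | none => st) (c, used)).1
    = (rs.foldl
      (fun (st : Nat × Int) r =>
        let j := pvB_skip parts (r - k) st.1
        if h : j < parts.length then
          if parts[j] ≤ r + k then (j + 1, st.2 + 1) else (j, st.2)
        else (j, st.2)) (j, c)).2 := by
  intro rs
  induction rs with
  | nil => intro _ used j c _ _ _ _; rfl
  | cons r rs' ih =>
    intro hsorted used j c hlen hjlen inv2 inv3
    have hsorted' := (List.pairwise_cons.1 hsorted).2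
    have hrlt := fun r' (h : r' ∈ rs') => List.rel_of_pairwise_cons hsorted h
    set j' := pvB_skip parts (r - k) j with hj'
    have hjle : j ≤ j' := pvB_skip_le parts (r - k) j
    have hj'len : j' ≤ parts.length := pvB_skip_le_length parts (r - k) j hjlen
    -- every index strictly below j' fails A's condition
    have hfail : ∀ i (h : i < parts.length), i < j' → ¬(|r - parts[i]| ≤ k ∧ used.getD i false = false) := by
      intro i hi hij' hcond
      rcases hcond with ⟨habs, hunused⟩
      by_cases hij : i < j
      · have := inv3 i hi hij hunused r (List.mem_cons_self)
        rw [abs_le] at habs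
        omega
      · have := pvB_skip_below parts (r - k) j i hi (by omega) hij'
        rw [abs_le] at habs
        omega
    simp only [List.foldl_cons]
    by_cases hlt : j' < parts.length
    · by_cases hle : parts[j'] ≤ r + k
      · -- robot matches part j'
        have hge : ¬ parts[j'] < r - k := pvB_skip_stop parts (r - k) j hlt
        have hfind : pvA_find k r parts used 0 = some j' := by
          apply pvA_find_some k r parts used j' hlt
          · constructor
            · rw [abs_le]; omega
            · rw [List.getD_eq_getElem used false (by omega)]
              exact inv2 j' (by omega) hjle
          · exact Nat.zero_le _
          · intro i hi _ hij'; exact hfail i hi hij'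
        rw [hfind]
        simp only
        rw [dif_pos hlt, if_pos hle]
        apply ih hsorted' (used.set j' true) (j' + 1) (c + 1)
        · simpa using hlen
        · omega
        · intro i hi hge'
          rw [List.getElem_set_ne (by omega) hi]
          exact inv2 i (by simpa using hi) (by omega)
        · intro i hi hij' hunused r' hr'
          have hir : i ≠ j' := by
            intro h
            subst h
            rw [List.getD_eq_getElem _ false (by simp; omega), List.getElem_set_self (by simp; omega)] at hunused
            exact Bool.noConfusion hunused
          have hunused' : used.getD i false = false := by
            rw [List.getD_eq_getElem _ false (by simp; omega), List.getElem_set_ne (by omega) (by simp; omega)] at hunused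
            rw [List.getD_eq_getElem _ false (by omega)]
            exact hunused
          by_cases hij : i < j
          · exact inv3 i hi hij hunused' r' (List.mem_cons_of_mem _ hr')
          · have h1 : parts[i] < r - k := pvB_skip_below parts (r - k) j i hi (by omega) (by omega)
            have h2 : r < r' := hrlt r' hr'
            omega
      · -- part j' exists but is too far right: nothing matches
        have hge : ¬ parts[j'] < r - k := pvB_skip_stop parts (r - k) j hlt
        have hfind : pvA_find k r parts used 0 = none := by
          apply pvA_find_none
          intro i hi _
          by_cases hij' : i < j'
          · exact hfail i hi hij'
          · intro ⟨habs, _⟩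
            rw [abs_le] at habs
            rcases Nat.eq_or_lt_of_le (Nat.le_of_not_lt hij') with rfl | hgt
            · omega
            · have := List.pairwise_iff_getElem.1 hp j' i hlt hi hgt
              omega
        rw [hfind]
        simp only
        rw [dif_pos hlt, if_neg hle]
        apply ih hsorted' used j' c hlen hj'len
        · intro i hi hge'; exact inv2 i hi (by omega)
        · intro i hi hij' hunused r' hr'
          by_cases hij : i < j
          · exact inv3 i hi hij hunused r' (List.mem_cons_of_mem _ hr')
          · have h1 : parts[i] < r - k := pvB_skip_below parts (r - k) j i hi (by omega) hij'
            have h2 : r < r' := hrlt r' hr'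
            omega
    · -- pointer ran off the end: nothing matches
      have hfind : pvA_find k r parts used 0 = none := by
        apply pvA_find_none
        intro i hi _
        exact hfail i hi (by omega)
      rw [hfind]
      simp only
      rw [dif_neg hlt]
      apply ih hsorted' used j' c hlen hj'len
      · intro i hi hge'; exact inv2 i hi (by omega)
      · intro i hi hij' hunused r' hr'
        by_cases hij : i < j
        · exact inv3 i hi hij hunused r' (List.mem_cons_of_mem _ hr')
        · have h1 : parts[i] < r - k := pvB_skip_below parts (r - k) j i hi (by omega) hij'
          have h2 : r < r' := hrlt r' hr'
          omega

-- ===== VERDICT (by name: the statement is the Claim_ definition above) =====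
theorem max_robots_can_grab_parts_spec : Claim_equal_max_robots_can_grab_parts := by
  intro n k line _ hpre
  unfold Spec_max_robots_can_grab_parts
  have hparse : pvA_parse line.toList n = pvB_parse line.toList 0 n := by
    have h := pvParse_eq line.toList line.toList 0 n ([], []) le_rfl (by simp) hpre
    unfold pvA_parse
    simpa using h
  simp only [max_robots_can_grab_parts, max_robots_can_grab_parts_alt, hparse]
  exact pvMain k _ (pvB_parse_sorted line.toList 0 n).2 _ (pvB_parse_sorted line.toList 0 n).1
    _ 0 0 (by simp) (by simp) (fun i hi _ => by simp) (fun i hi h0 => absurd h0 (Nat.not_lt_zero i))
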